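-- pv_equiv track=rewrite | github.com/joaofla/RV | C-ITS/C-ITS/application/application.py | create_client_route
-- ===== SOURCE A (Python) =====
-- def create_client_route(new_client_destin, new_client_src, new_route):
--     client_route = []
--     found = False
--     for i in range(0, len(new_route)):
--         if new_route[i] == new_client_src:
--             client_route.append(new_route[i])
--             found = True
--         elif new_route[i] == new_client_destin:
--             client_route.append(new_route[i])
--             return client_route
--         elif found:
--             client_route.append(new_route[i])
--     return client_route
-- ===== SOURCE B (Python) =====
-- def create_client_route(new_client_destin, new_client_src, new_route):
--     # Skip to the first endpoint (source or destination), then cut at the destination.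
--     i = 0
--     while i < len(new_route) and new_route[i] != new_client_src and new_route[i] != new_client_destin:
--         i += 1
--     tail = new_route[i:]
--     for j, x in enumerate(tail):
--         if x == new_client_destin:
--             return tail[:j + 1]
--     return tail
-- ===== Notes on version B (the rewrite author's own statement) =====
-- stated objective: simpler
-- what changed: A's single stateful scan with a 'found' flag, an accumulator and an early return is replaced by a skip-to-first-endpoint index loop followed by one slice cut at the first destination in the tail.
-- intended difference: When src == destin and its first occurrence in the route is not the last element, A returns the whole tail of the route from that occurrence (its destination branch is shadowed by the source branch), while B returns just [src]; the subroute from a node to itself is that single node, so B's value is the intended one. — e.g. on create_client_route("a", "a", ["a", "b"]): A returns ["a", "b"], B returns ["a"]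
import Mathlib
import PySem

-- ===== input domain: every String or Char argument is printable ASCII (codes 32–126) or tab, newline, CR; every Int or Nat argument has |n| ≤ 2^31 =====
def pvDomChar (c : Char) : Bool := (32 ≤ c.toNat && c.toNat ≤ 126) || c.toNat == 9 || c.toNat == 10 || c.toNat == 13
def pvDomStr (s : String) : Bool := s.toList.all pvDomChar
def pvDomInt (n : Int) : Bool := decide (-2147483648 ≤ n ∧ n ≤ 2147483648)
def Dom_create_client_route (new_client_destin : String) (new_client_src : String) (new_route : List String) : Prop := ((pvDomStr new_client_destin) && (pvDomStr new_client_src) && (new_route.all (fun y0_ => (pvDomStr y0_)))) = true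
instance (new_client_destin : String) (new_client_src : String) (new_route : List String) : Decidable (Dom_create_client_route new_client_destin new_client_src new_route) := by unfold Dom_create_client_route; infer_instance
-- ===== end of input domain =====

-- B replaces A's flag-based scan by skip-to-first-endpoint then slice-at-destination: simpler decomposition.
-- On src == destin with the first occurrence not last, B intentionally returns [src] where A returns the whole tail (see D_ below).

-- ===== PORT A =====
-- loop of A: state = (found, client_route accumulator); early 'return' = stop recursing
def createGoA (d s : String) : List String → Bool → List String → List String
  | [], _, acc => acc
  | x :: rest, found, acc =>
    if x == s then createGoA d s rest true (acc ++ [x])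
    else if x == d then acc ++ [x]
    else if found then createGoA d s rest found (acc ++ [x])
    else createGoA d s rest found acc

def create_client_route (new_client_destin : String) (new_client_src : String) (new_route : List String) : List String :=
  createGoA new_client_destin new_client_src new_route false []

-- ===== PORT B =====
-- the while loop of Source B: number of leading elements equal to neither endpoint
def altSkip (d s : String) : List String → Nat
  | [] => 0
  | x :: xs => if !(x == s) && !(x == d) then altSkip d s xs + 1 else 0

-- the for loop of Source B: index of the first element equal to the destination (early return)
def altCut (d : String) : List String → Option Nat
  | [] => none
  | x :: xs => if x == d then some 0 else (altCut d xs).map (· + 1)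

def create_client_route_alt (new_client_destin : String) (new_client_src : String) (new_route : List String) : List String :=
  let tail := new_route.drop (altSkip new_client_destin new_client_src new_route)
  match altCut new_client_destin tail with
  | some j => tail.take (j + 1)        -- tail[:j+1]
  | none => tail

-- ===== PRECONDITION & SPEC =====
-- When src == destin and the first occurrence of src in the route is not its last element,
-- A returns the whole tail from that occurrence (the destination branch is shadowed by the
-- source branch), while B returns just [src]; the subroute from a node to itself is that
-- single node, so B's value is the intended one.
def D_create_client_route (new_client_destin : String) (new_client_src : String) (new_route : List String) : Prop :=
  new_client_src = new_client_destin ∧ new_client_src ∈ new_route ∧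
    new_route.idxOf new_client_src + 1 < new_route.length
instance (new_client_destin : String) (new_client_src : String) (new_route : List String) : Decidable (D_create_client_route new_client_destin new_client_src new_route) := by unfold D_create_client_route; infer_instance

def Spec_create_client_route (new_client_destin : String) (new_client_src : String) (new_route : List String) (out : List String) : Prop := ¬ D_create_client_route new_client_destin new_client_src new_route → out = create_client_route_alt new_client_destin new_client_src new_route
instance (new_client_destin : String) (new_client_src : String) (new_route : List String) (out : List String) : Decidable (Spec_create_client_route new_client_destin new_client_src new_route out) := by unfold Spec_create_client_route; infer_instance

def pvDiffWitness_create_client_route : String × String × List String := ("a", "a", ["a", "b"])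
def pvDiffWitnessOut_create_client_route : (List String) × (List String) := (["a", "b"], ["a"])

-- ===== CLAIM (what is proved, stated in full; the proofs are below) =====
def Claim_unchanged_create_client_route : Prop := ∀ (new_client_destin : String) (new_client_src : String) (new_route : List String), Dom_create_client_route new_client_destin new_client_src new_route → Spec_create_client_route new_client_destin new_client_src new_route (create_client_route new_client_destin new_client_src new_route)
def Claim_changed_create_client_route : Prop := Dom_create_client_route (pvDiffWitness_create_client_route.1) (pvDiffWitness_create_client_route.2.1) (pvDiffWitness_create_client_route.2.2) ∧ D_create_client_route (pvDiffWitness_create_client_route.1) (pvDiffWitness_create_client_route.2.1) (pvDiffWitness_create_client_route.2.2) ∧ create_client_route (pvDiffWitness_create_client_route.1) (pvDiffWitness_create_client_route.2.1) (pvDiffWitness_create_client_route.2.2) = pvDiffWitnessOut_create_client_route.1 ∧ create_client_route_alt (pvDiffWitness_create_client_route.1) (pvDiffWitness_create_client_route.2.1) (pvDiffWitness_create_client_route.2.2) = pvDiffWitnessOut_create_client_route.2 ∧ pvDiffWitnessOut_create_client_route.1 ≠ pvDiffWitnessOut_create_client_route.2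
def Claim_exact_create_client_route : Prop := ∀ (new_client_destin : String) (new_client_src : String) (new_route : List String), Dom_create_client_route new_client_destin new_client_src new_route → D_create_client_route new_client_destin new_client_src new_route → create_client_route new_client_destin new_client_src new_route ≠ create_client_route_alt new_client_destin new_client_src new_route

-- ===== LEMMAS AND PROOFS =====

-- src = destin, found: A appends everything
theorem goA_eq_true (d : String) (xs : List String) (acc : List String) :
    createGoA d d xs true acc = acc ++ xs := by
  induction xs generalizing acc with
  | nil => simp [createGoA]
  | cons x rest ih =>
    by_cases h : x = d <;> simp [createGoA, h, ih]

-- src ≠ destin, found: A appends up to (and including) the first destin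
theorem goA_ne_true (d s : String) (hne : s ≠ d) (xs : List String) (acc : List String) :
    createGoA d s xs true acc =
      acc ++ (match altCut d xs with
              | some i => xs.take (i + 1)
              | none => xs) := by
  induction xs generalizing acc with
  | nil => simp [createGoA, altCut]
  | cons x rest ih =>
    by_cases hs : x = s
    · have hd : x ≠ d := hs ▸ hne
      simp only [createGoA, altCut, beq_iff_eq, hs, if_true, ih]
      cases hf : altCut d rest <;> simp [hne]
    · by_cases hd : x = d
      · simp [createGoA, altCut, hd, Ne.symm hne]
      · simp only [createGoA, altCut, beq_iff_eq, hs, hd, if_false, if_true, ih]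
        cases hf : altCut d rest <;> simp

-- src ≠ destin: A equals B
theorem goA_ne (d s : String) (hne : s ≠ d) (xs : List String) :
    createGoA d s xs false [] = create_client_route_alt d s xs := by
  induction xs with
  | nil => simp [createGoA, create_client_route_alt, altSkip, altCut]
  | cons x rest ih =>
    by_cases hs : x = s
    · have hd : x ≠ d := hs ▸ hne
      simp only [createGoA, beq_iff_eq, hs, if_true, goA_ne_true d s hne,
        create_client_route_alt, altSkip, List.nil_append]
      cases hf : altCut d rest <;> simp [altCut, hne, hf]
    · by_cases hd : x = d
      · simp [createGoA, create_client_route_alt, altSkip, altCut, hd, Ne.symm hne]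
      · simp only [createGoA, beq_iff_eq, hs, hd, if_false, ih,
          create_client_route_alt, altSkip]
        simp [hs, hd]

-- src = destin: A yields the whole tail from the first occurrence
theorem goA_eq_tail (d : String) (xs : List String) :
    createGoA d d xs false [] = xs.drop (altSkip d d xs) := by
  induction xs with
  | nil => simp [createGoA, altSkip]
  | cons x rest ih =>
    by_cases h : x = d
    · simp [createGoA, altSkip, h, goA_eq_true]
    · simp [createGoA, altSkip, h, ih]

-- src = destin: B yields at most the first element of that tail
theorem alt_eq_take_one (d : String) (xs : List String) :
    create_client_route_alt d d xs = (xs.drop (altSkip d d xs)).take 1 := by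
  induction xs with
  | nil => simp [create_client_route_alt, altSkip, altCut]
  | cons x rest ih =>
    by_cases h : x = d
    · simp [create_client_route_alt, altSkip, altCut, h]
    · have hskip : altSkip d d (x :: rest) = altSkip d d rest + 1 := by
        simp [altSkip, h]
      simp only [create_client_route_alt] at ih ⊢
      rw [hskip, List.drop_succ_cons]
      exact ih

-- the skip count in the src = destin case is List.idxOf
theorem altSkip_eq_idxOf (d : String) (xs : List String) :
    altSkip d d xs = xs.idxOf d := by
  induction xs with
  | nil => simp [altSkip]
  | cons x rest ih =>
    by_cases h : x = d <;> simp [altSkip, h, ih]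

theorem tail_length (d : String) (xs : List String) :
    (xs.drop (altSkip d d xs)).length = xs.length - xs.idxOf d := by
  simp [altSkip_eq_idxOf]

-- ===== VERDICT (by name: the statement is the Claim_ definition above) =====
theorem create_client_route_spec : Claim_unchanged_create_client_route := by
  intro d s xs _ hnd
  unfold create_client_route
  by_cases hsd : s = d
  · subst hsd
    rw [goA_eq_tail, alt_eq_take_one]
    by_cases hmem : s ∈ xs
    · have hlt : xs.idxOf s < xs.length := List.idxOf_lt_length_of_mem hmem
      have hge : ¬ (xs.idxOf s + 1 < xs.length) := by
        intro h; exact hnd ⟨rfl, hmem, h⟩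
      have hlen : (xs.drop (altSkip s s xs)).length ≤ 1 := by
        rw [tail_length]; omega
      exact (List.take_of_length_le hlen).symm
    · have : xs.idxOf s = xs.length := List.idxOf_eq_length_iff.mpr hmem
      rw [altSkip_eq_idxOf, this]
      simp
  · exact goA_ne d s hsd xs

theorem create_client_route_changed : Claim_changed_create_client_route := by
  unfold Claim_changed_create_client_route; decide

theorem create_client_route_tight : Claim_exact_create_client_route := by
  intro d s xs _ hD heq
  obtain ⟨hsd, hmem, hlt⟩ := hD
  subst hsd
  rw [create_client_route] at heq
  rw [goA_eq_tail, alt_eq_take_one] at heq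
  have hlen := congrArg List.length heq
  simp only [List.length_take, tail_length] at hlen
  have hlt' : xs.idxOf s < xs.length := List.idxOf_lt_length_of_mem hmem
  omega
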